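-- pv_equiv track=rewrite | github.com/mistmake/HSE_vibe_hack | gradebook_finder.py | build_relevant_excerpt
-- ===== SOURCE A (Python) =====
-- def build_relevant_excerpt(raw_text: str, group_code: str) -> str:
--     group_bucket = group_code.split("-")[0]
--     lines = raw_text.splitlines()
--     selected_indexes = set()
--     markers = (
--         "docs.google.com/spreadsheets",
--         group_code,
--         group_bucket,
--         "Results",
--         "results",
--         "grades",
--         "google table",
--         "Group",
--         "Groups",
--     )
--
--     for index, line in enumerate(lines):
--         if any(marker in line for marker in markers):
--             for neighbor in range(max(0, index - 1), min(len(lines), index + 2)):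
--                 selected_indexes.add(neighbor)
--
--     if not selected_indexes:
--         return raw_text[:5000]
--
--     excerpt = "\n".join(lines[index] for index in sorted(selected_indexes))
--     return excerpt[:12000]
-- ===== SOURCE B (Python) =====
-- def build_relevant_excerpt(raw_text: str, group_code: str) -> str:
--     group_bucket = group_code.split("-")[0]
--     lines = raw_text.splitlines()
--     markers = (
--         "docs.google.com/spreadsheets",
--         group_code,
--         group_bucket,
--         "Results",
--         "results",
--         "grades",
--         "google table",
--         "Group",
--         "Groups",
--     )
--     n = len(lines)
--
--     hits = [i for i, line in enumerate(lines) if any(m in line for m in markers)]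
--     if not hits:
--         return raw_text[:5000]
--
--     # merge the ±1 windows around the hits into disjoint intervals, streaming
--     start, end = max(0, hits[0] - 1), min(n, hits[0] + 2)
--     pieces = []
--     for i in hits[1:]:
--         a, b = max(0, i - 1), min(n, i + 2)
--         if a <= end:
--             end = max(end, b)
--         else:
--             pieces.extend(lines[start:end])
--             start, end = a, b
--     pieces.extend(lines[start:end])
--     return "\n".join(pieces)[:12000]
-- ===== Notes on version B (the rewrite author's own statement) =====
-- stated objective: alternative
-- what changed: B computes the list of matching line indexes once, merges their ±1 windows into disjoint intervals with a streaming (start,end) accumulator, and emits one contiguous line slice per interval — no index set, no sort, no per-line neighbor test.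
import Mathlib
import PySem

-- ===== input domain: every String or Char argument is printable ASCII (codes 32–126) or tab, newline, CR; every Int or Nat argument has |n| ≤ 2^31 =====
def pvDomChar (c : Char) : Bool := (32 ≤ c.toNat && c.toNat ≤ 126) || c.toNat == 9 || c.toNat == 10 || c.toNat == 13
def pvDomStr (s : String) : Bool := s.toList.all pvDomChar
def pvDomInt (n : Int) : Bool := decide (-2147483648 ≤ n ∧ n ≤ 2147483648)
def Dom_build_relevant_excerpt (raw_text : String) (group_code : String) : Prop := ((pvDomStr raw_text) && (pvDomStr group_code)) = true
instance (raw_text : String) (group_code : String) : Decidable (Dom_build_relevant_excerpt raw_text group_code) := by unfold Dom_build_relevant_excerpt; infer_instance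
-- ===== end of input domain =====

-- B replaces A's set-of-neighbor-indexes + sort with a streaming interval merge: it lists the
-- matching line indexes once, merges their ±1 windows into disjoint intervals, and emits one
-- contiguous line slice per interval (objective: alternative; no set, no sort).

-- shared marker-tuple setup (identical in both Pythons)
def pvMarkers (group_code : String) (group_bucket : String) : List String :=
  ["docs.google.com/spreadsheets", group_code, group_bucket, "Results", "results",
   "grades", "google table", "Group", "Groups"]

-- ===== PORT A =====
def build_relevant_excerpt (raw_text : String) (group_code : String) : String :=
  let group_bucket := ((PySem.Str.split? group_code "-").getD []).headD ""
  let lines := PySem.Str.splitlines raw_text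
  let markers := pvMarkers group_code group_bucket
  let selected := (PySem.List.enumerate lines 0).foldl
    (fun s p =>
      if markers.any (fun m => PySem.Str.isIn m p.2) then
        (PySem.List.pyRange (max 0 (p.1 - 1)) (min (lines.length : Int) (p.1 + 2))).foldl
          PySem.Set.add s
      else s)
    PySem.Set.empty
  if selected = [] then PySem.Str.slice raw_text none (some 5000)
  else
    PySem.Str.slice
      (PySem.Str.join "\n"
        ((PySem.List.sorted selected (fun x => x) false).map
          (fun i => PySem.List.pyGetD lines i "")))
      none (some 12000)

-- ===== PORT B =====
-- B's list comprehension: the indexes of the marker-matching lines, in order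
def pvHits (lines markers : List String) : List Int :=
  ((PySem.List.enumerate lines 0).filter
      (fun p => markers.any (fun m => PySem.Str.isIn m p.2))).map (·.1)

-- the body of B's for-loop: merge the ±1 window of hit i into the running (start, end, pieces)
def pvMergeStep (lines : List String) (st : Int × Int × List String) (i : Int) :
    Int × Int × List String :=
  let a := max 0 (i - 1)
  let b := min (lines.length : Int) (i + 2)
  if a ≤ st.2.1 then (st.1, max st.2.1 b, st.2.2)
  else (a, b, st.2.2 ++ PySem.List.slice lines (some st.1) (some st.2.1))

def build_relevant_excerpt_alt (raw_text : String) (group_code : String) : String :=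
  let group_bucket := ((PySem.Str.split? group_code "-").getD []).headD ""
  let lines := PySem.Str.splitlines raw_text
  let markers := pvMarkers group_code group_bucket
  match pvHits lines markers with
  | [] => PySem.Str.slice raw_text none (some 5000)
  | h :: rest =>
    let st := rest.foldl (pvMergeStep lines)
      (max 0 (h - 1), min (lines.length : Int) (h + 2), [])
    let pieces := st.2.2 ++ PySem.List.slice lines (some st.1) (some st.2.1)
    PySem.Str.slice (PySem.Str.join "\n" pieces) none (some 12000)

-- ===== PRECONDITION & SPEC =====
def Spec_build_relevant_excerpt (raw_text : String) (group_code : String) (out : String) : Prop := out = build_relevant_excerpt_alt raw_text group_code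
instance (raw_text : String) (group_code : String) (out : String) : Decidable (Spec_build_relevant_excerpt raw_text group_code out) := by unfold Spec_build_relevant_excerpt; infer_instance

-- ===== CLAIM =====
def Claim_equal_build_relevant_excerpt : Prop := ∀ (raw_text : String) (group_code : String), Dom_build_relevant_excerpt raw_text group_code → Spec_build_relevant_excerpt raw_text group_code (build_relevant_excerpt raw_text group_code)

-- ===== LEMMAS AND PROOFS =====

theorem mem_foldl_add (ys : List Int) (s : List Int) (j : Int) :
    j ∈ ys.foldl PySem.Set.add s ↔ j ∈ s ∨ j ∈ ys := by
  induction ys generalizing s with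
  | nil => simp
  | cons y ys ih => simp only [List.foldl, ih, PySem.Set.mem_add, List.mem_cons]; tauto

theorem nodup_foldl_add (ys : List Int) (s : List Int) (h : s.Nodup) :
    (ys.foldl PySem.Set.add s).Nodup := by
  induction ys generalizing s with
  | nil => exact h
  | cons y ys ih => exact ih _ (PySem.Set.nodup_add s y h)

theorem mem_selLoop (P : Int × String → Bool) (R : Int × String → List Int)
    (l : List (Int × String)) (s : List Int) (j : Int) :
    j ∈ l.foldl (fun s p => if P p then (R p).foldl PySem.Set.add s else s) s ↔
      j ∈ s ∨ ∃ p ∈ l, P p = true ∧ j ∈ R p := by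
  induction l generalizing s with
  | nil => simp
  | cons p l ih =>
    simp only [List.foldl, ih]
    by_cases hp : P p = true
    · simp [hp, mem_foldl_add]
      tauto
    · simp [hp]

theorem nodup_selLoop (P : Int × String → Bool) (R : Int × String → List Int)
    (l : List (Int × String)) (s : List Int) (h : s.Nodup) :
    (l.foldl (fun s p => if P p then (R p).foldl PySem.Set.add s else s) s).Nodup := by
  induction l generalizing s with
  | nil => exact h
  | cons p l ih =>
    simp only [List.foldl]
    by_cases hp : P p = true <;> simp only [hp, if_true]
    · exact ih _ (nodup_foldl_add _ _ h)
    · exact ih _ h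

-- membership in B's hit list
theorem mem_pvHits (lines markers : List String) (i : Int) :
    i ∈ pvHits lines markers ↔
      ∃ k : Nat, k < lines.length ∧
        markers.any (fun m => PySem.Str.isIn m (lines.getD k "")) = true ∧ i = (k : Int) := by
  simp only [pvHits, List.mem_map, List.mem_filter, PySem.List.mem_enumerate_iff]
  constructor
  · rintro ⟨p, ⟨⟨k, hk, rfl⟩, hP⟩, rfl⟩
    exact ⟨k, hk, by rw [List.getD_eq_getElem _ _ hk]; simpa using hP, by simp⟩
  · rintro ⟨k, hk, hP, rfl⟩
    rw [List.getD_eq_getElem _ _ hk] at hP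
    exact ⟨((0 : Int) + (k : Nat), lines[k]), ⟨⟨k, hk, rfl⟩, hP⟩, by simp⟩

theorem pairwise_pvHits (lines markers : List String) :
    (pvHits lines markers).Pairwise (· < ·) :=
  List.pairwise_map.mpr ((PySem.List.pairwise_lt_enumerate lines 0).filter _)

-- membership in A's neighbor-index set, phrased over B's hit list
theorem selA_mem (lines markers : List String) (j : Int) :
    (j ∈ (PySem.List.enumerate lines 0).foldl
        (fun s p =>
          if markers.any (fun m => PySem.Str.isIn m p.2) then
            (PySem.List.pyRange (max 0 (p.1 - 1)) (min (lines.length : Int) (p.1 + 2))).foldl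
              PySem.Set.add s
          else s)
        PySem.Set.empty) ↔
      ∃ i ∈ pvHits lines markers,
        max 0 (i - 1) ≤ j ∧ j < min (lines.length : Int) (i + 2) := by
  rw [mem_selLoop]
  simp only [PySem.Set.empty, List.not_mem_nil, false_or, PySem.List.mem_enumerate_iff,
    PySem.List.mem_pyRange_one]
  constructor
  · rintro ⟨p, ⟨k, hk, rfl⟩, hP, h1, h2⟩
    refine ⟨(k : Int), ?_, by simpa using h1, by simpa using h2⟩
    rw [mem_pvHits]
    refine ⟨k, hk, ?_, rfl⟩
    rw [List.getD_eq_getElem _ _ hk]; simpa using hP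
  · rintro ⟨i, hi, h1, h2⟩
    rw [mem_pvHits] at hi
    obtain ⟨k, hk, hP, rfl⟩ := hi
    rw [List.getD_eq_getElem _ _ hk] at hP
    exact ⟨((0 : Int) + (k : Nat), lines[k]), ⟨k, hk, rfl⟩, by simpa using hP,
      by simpa using h1, by simpa using h2⟩

-- lines[s:e] is the window of lines at the indexes in range(s, e)
theorem slice_eq_map_range (lines : List String) (s e : Int)
    (h0 : 0 ≤ s) (hse : s ≤ e) (he : e ≤ (lines.length : Int)) :
    PySem.List.slice lines (some s) (some e)
      = (PySem.List.pyRange s e).map (fun j => PySem.List.pyGetD lines j "") := by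
  rw [PySem.List.slice_toNat lines h0 (le_trans h0 hse)]
  have hkey : (PySem.List.pyRange s (lines.length : Int)).map
      (fun j => PySem.List.pyGetD lines j "") = lines.drop s.toNat := by
    have := PySem.List.map_pyGetD_pyRange lines "" h0
    simpa [PySem.List.len_eq] using this
  rw [PySem.List.pyRange_one_append s e (lines.length : Int) hse he, List.map_append] at hkey
  rw [← hkey]
  have hlen : ((PySem.List.pyRange s e).map
      (fun j => PySem.List.pyGetD lines j "")).length = e.toNat - s.toNat := by
    rw [List.length_map, PySem.List.length_pyRange_one]; omega
  rw [← hlen, List.take_left]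

-- the streaming interval-merge invariant: the fold's pieces are the mapped image of an index
-- list L' which, followed by range(start, end), is strictly sorted and covers exactly the
-- union of the already-seen windows
theorem merge_go (lines : List String) (rest : List Int) (s e : Int) (L : List Int)
    (h0 : 0 ≤ s) (hse : s ≤ e) (he : e ≤ (lines.length : Int))
    (hLlt : ∀ j ∈ L, j < s) (hLp : L.Pairwise (· < ·))
    (hlb : ∀ i ∈ rest, 0 ≤ i ∧ i < (lines.length : Int) ∧
      e ≤ min (lines.length : Int) (i + 2) ∧ s ≤ max 0 (i - 1))
    (hrp : rest.Pairwise (· < ·)) :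
    ∃ s' e' L',
      rest.foldl (pvMergeStep lines)
          (s, e, L.map (fun j => PySem.List.pyGetD lines j ""))
        = (s', e', L'.map (fun j => PySem.List.pyGetD lines j "")) ∧
      0 ≤ s' ∧ s' ≤ e' ∧ e' ≤ (lines.length : Int) ∧
      (L' ++ PySem.List.pyRange s' e').Pairwise (· < ·) ∧
      (∀ j, j ∈ L' ++ PySem.List.pyRange s' e' ↔
        j ∈ L ∨ (s ≤ j ∧ j < e) ∨
          ∃ i ∈ rest, max 0 (i - 1) ≤ j ∧ j < min (lines.length : Int) (i + 2)) := by
  induction rest generalizing s e L with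
  | nil =>
    refine ⟨s, e, L, rfl, h0, hse, he, ?_, ?_⟩
    · rw [List.pairwise_append]
      exact ⟨hLp, PySem.List.pairwise_lt_pyRange_one s e, fun a ha b hb =>
        lt_of_lt_of_le (hLlt a ha) (PySem.List.mem_pyRange_one.mp hb).1⟩
    · intro j
      simp [List.mem_append, PySem.List.mem_pyRange_one]
  | cons i rest ih =>
    obtain ⟨hi0, hin, hei, hsi⟩ := hlb i (List.mem_cons_self ..)
    have hirest : ∀ i' ∈ rest, i < i' := (List.pairwise_cons.mp hrp).1
    rw [List.foldl_cons]
    by_cases hab : max 0 (i - 1) ≤ e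
    · -- merge: extend the open interval
      have hstep : pvMergeStep lines (s, e, L.map (fun j => PySem.List.pyGetD lines j "")) i
          = (s, max e (min (lines.length : Int) (i + 2)),
             L.map (fun j => PySem.List.pyGetD lines j "")) := by
        simp [pvMergeStep, hab]
      rw [hstep]
      obtain ⟨s', e', L', heq, h0', hse', he', hpw, hmem⟩ :=
        ih s (max e (min (lines.length : Int) (i + 2))) L h0 (by omega) (by omega) hLlt hLp
          (fun i' hi' => by
            obtain ⟨a1, a2, a3, a4⟩ := hlb i' (List.mem_cons_of_mem _ hi')
            have := hirest i' hi'
            exact ⟨a1, a2, by omega, a4⟩)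
          (List.pairwise_cons.mp hrp).2
      refine ⟨s', e', L', heq, h0', hse', he', hpw, fun j => ?_⟩
      rw [hmem j]
      constructor
      · rintro (h | h | ⟨i', hi', h⟩)
        · exact Or.inl h
        · by_cases hje : j < e
          · exact Or.inr (Or.inl ⟨h.1, hje⟩)
          · exact Or.inr (Or.inr ⟨i, List.mem_cons_self .., by omega⟩)
        · exact Or.inr (Or.inr ⟨i', List.mem_cons_of_mem _ hi', h⟩)
      · rintro (h | h | ⟨i', hi', h⟩)
        · exact Or.inl h
        · exact Or.inr (Or.inl ⟨h.1, by omega⟩)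
        · rcases List.mem_cons.mp hi' with rfl | hi''
          · exact Or.inr (Or.inl (by omega))
          · exact Or.inr (Or.inr ⟨i', hi'', h⟩)
    · -- flush: close the interval as a slice and open a new one
      have hea : e < max 0 (i - 1) := by omega
      have hstep : pvMergeStep lines (s, e, L.map (fun j => PySem.List.pyGetD lines j "")) i
          = (max 0 (i - 1), min (lines.length : Int) (i + 2),
             (L ++ PySem.List.pyRange s e).map (fun j => PySem.List.pyGetD lines j "")) := by
        simp only [pvMergeStep, hab, if_false, List.map_append]
        rw [slice_eq_map_range lines s e h0 hse he]
      rw [hstep]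
      obtain ⟨s', e', L', heq, h0', hse', he', hpw, hmem⟩ :=
        ih (max 0 (i - 1)) (min (lines.length : Int) (i + 2)) (L ++ PySem.List.pyRange s e)
          (by omega) (by omega) (by omega)
          (fun j hj => by
            rcases List.mem_append.mp hj with h | h
            · have := hLlt j h; omega
            · have := (PySem.List.mem_pyRange_one.mp h).2; omega)
          (by
            rw [List.pairwise_append]
            exact ⟨hLp, PySem.List.pairwise_lt_pyRange_one s e, fun a ha b hb =>
              lt_of_lt_of_le (hLlt a ha) (PySem.List.mem_pyRange_one.mp hb).1⟩)
          (fun i' hi' => by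
            obtain ⟨a1, a2, a3, a4⟩ := hlb i' (List.mem_cons_of_mem _ hi')
            have := hirest i' hi'
            exact ⟨a1, a2, by omega, by omega⟩)
          (List.pairwise_cons.mp hrp).2
      refine ⟨s', e', L', heq, h0', hse', he', hpw, fun j => ?_⟩
      rw [hmem j]
      simp only [List.mem_append, PySem.List.mem_pyRange_one, List.mem_cons]
      constructor
      · rintro ((h | h) | h | ⟨i', hi', h⟩)
        · exact Or.inl h
        · exact Or.inr (Or.inl h)
        · exact Or.inr (Or.inr ⟨i, Or.inl rfl, h⟩)
        · exact Or.inr (Or.inr ⟨i', Or.inr hi', h⟩)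
      · rintro (h | h | ⟨i', rfl | hi', h⟩)
        · exact Or.inl (Or.inl h)
        · exact Or.inl (Or.inr h)
        · exact Or.inr (Or.inl h)
        · exact Or.inr (Or.inr ⟨i', hi', h⟩)

-- the whole post-setup computation agrees, for any lines/markers/raw_text
theorem excerpt_core (raw_text : String) (lines markers : List String) :
    (let selected := (PySem.List.enumerate lines 0).foldl
      (fun s p =>
        if markers.any (fun m => PySem.Str.isIn m p.2) then
          (PySem.List.pyRange (max 0 (p.1 - 1)) (min (lines.length : Int) (p.1 + 2))).foldl
            PySem.Set.add s
        else s)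
      PySem.Set.empty
    if selected = [] then PySem.Str.slice raw_text none (some 5000)
    else
      PySem.Str.slice
        (PySem.Str.join "\n"
          ((PySem.List.sorted selected (fun x => x) false).map
            (fun i => PySem.List.pyGetD lines i "")))
        none (some 12000)) =
    (match pvHits lines markers with
    | [] => PySem.Str.slice raw_text none (some 5000)
    | h :: rest =>
      let st := rest.foldl (pvMergeStep lines)
        (max 0 (h - 1), min (lines.length : Int) (h + 2), [])
      let pieces := st.2.2 ++ PySem.List.slice lines (some st.1) (some st.2.1)
      PySem.Str.slice (PySem.Str.join "\n" pieces) none (some 12000)) := by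
  rcases hH : pvHits lines markers with _ | ⟨h, rest⟩
  · -- no hits: A's set is empty, both fall back to raw_text[:5000]
    have hsel : (PySem.List.enumerate lines 0).foldl
        (fun s p =>
          if markers.any (fun m => PySem.Str.isIn m p.2) then
            (PySem.List.pyRange (max 0 (p.1 - 1)) (min (lines.length : Int) (p.1 + 2))).foldl
              PySem.Set.add s
          else s)
        PySem.Set.empty = [] := by
      rw [List.eq_nil_iff_forall_not_mem]
      intro j hj
      obtain ⟨i, hi, -⟩ := (selA_mem lines markers j).mp hj
      rw [hH] at hi
      exact List.not_mem_nil hi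
    rw [if_pos hsel]
  · -- at least one hit
    have hhm : h ∈ pvHits lines markers := by rw [hH]; exact List.mem_cons_self ..
    obtain ⟨kh, hkh, -, hhk⟩ := (mem_pvHits lines markers h).mp hhm
    have hh0 : 0 ≤ h := by omega
    have hhn : h < (lines.length : Int) := by omega
    have hpp := pairwise_pvHits lines markers
    rw [hH] at hpp
    have hirest : ∀ i' ∈ rest, h < i' := (List.pairwise_cons.mp hpp).1
    have hbnds : ∀ i ∈ rest, 0 ≤ i ∧ i < (lines.length : Int) := by
      intro i hi
      have : i ∈ pvHits lines markers := by rw [hH]; exact List.mem_cons_of_mem _ hi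
      obtain ⟨k, hk, -, rfl⟩ := (mem_pvHits lines markers i).mp this
      exact ⟨by omega, by omega⟩
    obtain ⟨s', e', L', heq, h0', hse', he', hpw, hmem⟩ :=
      merge_go lines rest (max 0 (h - 1)) (min (lines.length : Int) (h + 2)) []
        (by omega) (by omega) (by omega) (by simp) List.Pairwise.nil
        (fun i hi => by
          obtain ⟨a1, a2⟩ := hbnds i hi
          have := hirest i hi
          exact ⟨a1, a2, by omega, by omega⟩)
        (List.pairwise_cons.mp hpp).2
    -- A's set is nonempty (h's own index is in it)
    have hne : (PySem.List.enumerate lines 0).foldl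
        (fun s p =>
          if markers.any (fun m => PySem.Str.isIn m p.2) then
            (PySem.List.pyRange (max 0 (p.1 - 1)) (min (lines.length : Int) (p.1 + 2))).foldl
              PySem.Set.add s
          else s)
        PySem.Set.empty ≠ [] := by
      intro hnil
      have : h ∈ ([] : List Int) := by
        rw [← hnil]
        exact (selA_mem lines markers h).mpr ⟨h, hhm, by omega, by omega⟩
      exact List.not_mem_nil this
    simp only [List.map_nil] at heq
    -- A's sorted index set IS B's flattened interval index list
    have hsorted : PySem.List.sorted
        ((PySem.List.enumerate lines 0).foldl
          (fun s p =>
            if markers.any (fun m => PySem.Str.isIn m p.2) then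
              (PySem.List.pyRange (max 0 (p.1 - 1)) (min (lines.length : Int) (p.1 + 2))).foldl
                PySem.Set.add s
            else s)
          PySem.Set.empty) (fun x => x) false
        = L' ++ PySem.List.pyRange s' e' := by
      apply PySem.List.sorted_eq_of_perm_of_pairwise_lt
      · refine (List.perm_ext_iff_of_nodup (hpw.imp ne_of_lt)
          (nodup_selLoop _ _ _ _ List.nodup_nil)).mpr (fun j => ?_)
        rw [hmem j]
        have hs := selA_mem lines markers j
        rw [hH] at hs
        refine Iff.trans ?_ hs.symm
        simp only [List.not_mem_nil, false_or, List.mem_cons]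
        constructor
        · rintro (h1 | ⟨i', hi', h1⟩)
          · exact ⟨h, Or.inl rfl, by omega⟩
          · exact ⟨i', Or.inr hi', h1⟩
        · rintro ⟨i', rfl | hi', h1⟩
          · exact Or.inl (by omega)
          · exact Or.inr ⟨i', hi', h1⟩
      · exact hpw
    rw [if_neg hne]
    simp only [heq, hsorted]
    rw [slice_eq_map_range lines s' e' h0' hse' he', ← List.map_append]

-- ===== VERDICT =====
theorem build_relevant_excerpt_spec : Claim_equal_build_relevant_excerpt := by
  intro raw_text group_code _
  unfold Spec_build_relevant_excerpt build_relevant_excerpt build_relevant_excerpt_alt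
  exact excerpt_core raw_text (PySem.Str.splitlines raw_text)
    (pvMarkers group_code (((PySem.Str.split? group_code "-").getD []).headD ""))
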